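-- pv_equiv track=rewrite | github.com/hupht/ip-pool-crawler | crawler/proxy_picker.py | allocate_protocols
-- ===== SOURCE A (Python) =====
-- from typing import Iterable, Optional, Sequence
--
-- DEFAULT_PROTOCOLS = ["http", "https"]
--
-- def allocate_protocols(protocols: Optional[Sequence[str]], count: int) -> list[str]:
--     if count <= 0:
--         return []
--     if protocols:
--         normalized = [p.lower() for p in protocols if p]
--         if not normalized:
--             normalized = DEFAULT_PROTOCOLS
--     else:
--         normalized = DEFAULT_PROTOCOLS
--
--     result: list[str] = []
--     for index in range(count):
--         result.append(normalized[index % len(normalized)])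
--     return result
-- ===== SOURCE B (Python) =====
-- DEFAULT_PROTOCOLS = ["http", "https"]
--
-- def allocate_protocols(protocols, count):
--     if count <= 0:
--         return []
--     normalized = [p.lower() for p in (protocols or []) if p] or DEFAULT_PROTOCOLS
--     q, r = divmod(count, len(normalized))
--     return normalized * q + normalized[:r]
-- ===== Notes on version B (the rewrite author's own statement) =====
-- stated objective: alternative
-- what changed: Normalization becomes a single or-expression over (protocols or []) and the element-wise modulo fill loop is replaced by q, r = divmod(count, len(normalized)); result = normalized * q + normalized[:r] (whole blocks plus a prefix instead of per-index modulo appends).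
import Mathlib
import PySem

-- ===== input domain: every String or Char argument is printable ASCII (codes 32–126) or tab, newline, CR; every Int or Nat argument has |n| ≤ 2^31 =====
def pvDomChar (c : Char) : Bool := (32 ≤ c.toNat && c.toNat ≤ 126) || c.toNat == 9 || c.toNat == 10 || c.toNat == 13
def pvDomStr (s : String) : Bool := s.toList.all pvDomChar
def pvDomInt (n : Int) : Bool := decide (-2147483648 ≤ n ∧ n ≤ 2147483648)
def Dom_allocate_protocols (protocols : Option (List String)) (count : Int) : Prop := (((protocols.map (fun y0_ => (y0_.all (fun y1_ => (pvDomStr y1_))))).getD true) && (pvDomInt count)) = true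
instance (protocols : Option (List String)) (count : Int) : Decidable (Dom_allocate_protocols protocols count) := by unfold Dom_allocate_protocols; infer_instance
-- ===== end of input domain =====

-- B normalizes with one or-expression and replaces A's per-index modulo fill loop by
-- q, r = divmod(count, len); whole-block repetition plus a prefix; same cost, different shape.

-- ===== PORT A =====
def allocate_protocols (protocols : Option (List String)) (count : Int) : List String :=
  if count ≤ 0 then []
  else
    let normalized :=
      match protocols with
      | some ps =>
          if ps ≠ [] then
            let n := (ps.filter (fun p => p ≠ "")).map PySem.Str.lower
            if n = [] then ["http", "https"] else n
          else ["http", "https"]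
      | none => ["http", "https"]
    (PySem.List.pyRange 0 count 1).foldl
      (fun result index =>
        result ++ [PySem.List.pyGetD normalized (PySem.Int.mod index (normalized.length : Int)) ""])
      []

-- ===== PORT B =====
def allocate_protocols_alt (protocols : Option (List String)) (count : Int) : List String :=
  if count ≤ 0 then []
  else
    -- normalized = [p.lower() for p in (protocols or []) if p] or DEFAULT_PROTOCOLS
    let mapped := ((protocols.getD []).filter (fun p => p ≠ "")).map PySem.Str.lower
    let normalized := if mapped = [] then ["http", "https"] else mapped
    -- q, r = divmod(count, len(normalized)); normalized * q + normalized[:r]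
    match PySem.Int.divmod? count (normalized.length : Int) with
    | some (q, r) =>
        List.flatten (List.replicate q.toNat normalized) ++ PySem.List.slice normalized none (some r)
    | none => []

-- ===== PRECONDITION & SPEC =====
def Spec_allocate_protocols (protocols : Option (List String)) (count : Int) (out : List String) : Prop := out = allocate_protocols_alt protocols count
instance (protocols : Option (List String)) (count : Int) (out : List String) : Decidable (Spec_allocate_protocols protocols count out) := by unfold Spec_allocate_protocols; infer_instance

-- ===== CLAIM =====
def Claim_equal_allocate_protocols : Prop := ∀ (protocols : Option (List String)) (count : Int), Dom_allocate_protocols protocols count → Spec_allocate_protocols protocols count (allocate_protocols protocols count)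

-- ===== LEMMAS AND PROOFS =====

lemma getElem_flat_rep {α : Type} (l : List α) (r i : Nat)
    (hi : i < (List.flatten (List.replicate r l)).length)
    (hm : i % l.length < l.length) :
    (List.flatten (List.replicate r l))[i] = l[i % l.length] := by
  induction r generalizing i with
  | zero => simp at hi
  | succ r ih =>
      have he : (List.replicate (r+1) l).flatten = l ++ (List.replicate r l).flatten := by
        rw [List.replicate_succ, List.flatten_cons]
      rw [List.getElem_of_eq he]
      have hi' : i < (l ++ (List.replicate r l).flatten).length := he ▸ hi
      rcases lt_or_ge i l.length with h | h
      · rw [List.getElem_append_left h]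
        simp only [Nat.mod_eq_of_lt h]
      · rw [List.getElem_append_right h]
        have hr : i - l.length < (List.replicate r l).flatten.length := by
          simp only [List.length_append] at hi'; omega
        rw [ih (i - l.length) hr (Nat.mod_lt _ (by omega))]
        simp only [Nat.mod_eq_sub_mod h]

lemma key_eq (l : List String) (hl : l ≠ []) (c : Int) (hc : 0 < c) :
    (PySem.List.pyRange 0 c 1).foldl
      (fun result index =>
        result ++ [PySem.List.pyGetD l (PySem.Int.mod index (l.length : Int)) ""]) []
    = List.flatten (List.replicate (PySem.Int.floordiv c (l.length : Int)).toNat l)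
        ++ PySem.List.slice l none (some (PySem.Int.mod c (l.length : Int))) := by
  have hlen : 0 < l.length := List.length_pos_iff.mpr hl
  have hlenZ : (0 : Int) < (l.length : Int) := by exact_mod_cast hlen
  have hq0 : (0:Int) ≤ PySem.Int.floordiv c (l.length : Int) := by
    rw [PySem.Int.floordiv_eq_ediv_of_pos hlenZ]
    exact Int.ediv_nonneg (le_of_lt hc) (le_of_lt hlenZ)
  have hr0 : (0:Int) ≤ PySem.Int.mod c (l.length : Int) := by
    rw [PySem.Int.mod_eq_emod_of_pos hlenZ]
    exact Int.emod_nonneg c (by omega)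
  have hrlt : PySem.Int.mod c (l.length : Int) < (l.length : Int) := by
    rw [PySem.Int.mod_eq_emod_of_pos hlenZ]
    exact Int.emod_lt_of_pos c hlenZ
  have hqr := PySem.Int.floordiv_mul_add_mod c (l.length : Int)
  set q : Int := PySem.Int.floordiv c (l.length : Int) with hqdef
  set r : Int := PySem.Int.mod c (l.length : Int) with hrdef
  -- Nat versions
  have hqn : (q.toNat : Int) = q := Int.toNat_of_nonneg hq0
  have hrn : (r.toNat : Int) = r := Int.toNat_of_nonneg hr0
  have hcn : c.toNat = q.toNat * l.length + r.toNat := by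
    have : (c.toNat : Int) = (q.toNat : Int) * (l.length : Int) + (r.toNat : Int) := by
      rw [hqn, hrn, Int.toNat_of_nonneg (le_of_lt hc)]; linarith [hqr]
    exact_mod_cast this
  have hrltn : r.toNat < l.length := by
    have : (r.toNat : Int) < (l.length : Int) := by rw [hrn]; exact hrlt
    exact_mod_cast this
  -- A side: the loop is a map over range
  rw [PySem.List.foldl_append_singleton_eq_map, PySem.List.pyRange_one]
  -- B side: the slice is a take
  rw [PySem.List.slice_to _ hr0]
  apply List.ext_getElem
  · simp only [List.nil_append, List.length_map, List.length_range, List.length_append,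
      List.length_flatten, List.map_replicate, List.sum_replicate, smul_eq_mul,
      List.length_take]
    omega
  · intro i h1 h2
    simp only [List.nil_append, List.length_map, List.length_range] at h1
    have hi : i < c.toNat := by omega
    have hm : i % l.length < l.length := Nat.mod_lt _ hlen
    have hmod : PySem.Int.mod ((0:Int) + (i:Int)) (l.length : Int) = ((i % l.length : Nat) : Int) := by
      rw [zero_add]; exact_mod_cast PySem.Int.mod_natCast i l.length
    simp only [List.nil_append, List.map_map, List.getElem_map, List.getElem_range, Function.comp]
    rw [hmod, PySem.List.pyGetD_natCast, List.getD_eq_getElem _ _ hm]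
    have hflatlen : (List.flatten (List.replicate q.toNat l)).length = q.toNat * l.length := by
      simp [List.map_replicate, List.sum_replicate, Nat.mul_comm]
    rcases lt_or_ge i (q.toNat * l.length) with h | h
    · rw [List.getElem_append_left (by omega)]
      rw [getElem_flat_rep l _ i (by omega) hm]
    · rw [List.getElem_append_right (by omega)]
      have hd : i - q.toNat * l.length < l.length := by omega
      have hmodeq : i % l.length = i - q.toNat * l.length := by
        conv_lhs => rw [show i = l.length * q.toNat + (i - q.toNat * l.length) by
          rw [Nat.mul_comm]; omega]
        rw [Nat.mul_add_mod]
        exact Nat.mod_eq_of_lt hd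
      simp only [List.getElem_take]
      congr 1
      rw [hflatlen, hmodeq]

lemma normalized_eq (protocols : Option (List String)) :
    (match protocols with
      | some ps =>
          if ps ≠ [] then
            let n := (ps.filter (fun p => p ≠ "")).map PySem.Str.lower
            if n = [] then ["http", "https"] else n
          else ["http", "https"]
      | none => ["http", "https"])
    = (let mapped := ((protocols.getD []).filter (fun p => p ≠ "")).map PySem.Str.lower
       if mapped = [] then ["http", "https"] else mapped) := by
  match protocols with
  | none => simp
  | some ps =>
      by_cases hps : ps = [] <;> simp_all

theorem allocate_protocols_spec_aux (protocols : Option (List String)) (count : Int) :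
    allocate_protocols protocols count = allocate_protocols_alt protocols count := by
  unfold allocate_protocols allocate_protocols_alt
  by_cases hc : count ≤ 0
  · simp [hc]
  · simp only [if_neg hc]
    rw [normalized_eq]
    set l := (let mapped := ((protocols.getD []).filter (fun p => p ≠ "")).map PySem.Str.lower
       if mapped = [] then ["http", "https"] else mapped) with hL
    have hl : l ≠ [] := by
      rw [hL]; dsimp only; split_ifs with h
      · simp
      · exact h
    have hdm : PySem.Int.divmod? count (l.length : Int)
        = some (PySem.Int.floordiv count (l.length : Int), PySem.Int.mod count (l.length : Int)) := by
      simp [PySem.Int.divmod?, PySem.Int.floordiv, PySem.Int.mod, hl]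
    rw [hdm]
    exact key_eq l hl count (by omega)

-- ===== VERDICT =====
theorem allocate_protocols_spec : Claim_equal_allocate_protocols := by
  intro protocols count _
  exact allocate_protocols_spec_aux protocols count
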